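-- pv_equiv track=rewrite | github.com/ttsim-dev/gettsim-personas | src/gettsim_personas/personas/_validate_p_ids_hook.py | _is_weakly_consecutive_increasing
-- ===== SOURCE A (Python) =====
-- def _is_weakly_consecutive_increasing(id_values: list[int]) -> bool:
--     """Check if a list of integers is weakly consecutive increasing starting from 0."""
--     if not id_values or id_values[0] != 0:
--         return False
--     last = 0
--     for val in id_values:
--         if val < last or val > last + 1:
--             return False
--         last = val
--     return True
-- ===== SOURCE B (Python) =====
-- def _is_weakly_consecutive_increasing(id_values: list[int]) -> bool:
--     """Check if a list of integers is weakly consecutive increasing starting from 0."""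
--     if not id_values:
--         return False
--     return (
--         id_values == sorted(id_values)
--         and min(id_values) == 0
--         and len(set(id_values)) == max(id_values) + 1
--     )
-- ===== Notes on version B (the rewrite author's own statement) =====
-- stated objective: simpler
-- what changed: Replaces A's single scan with a running `last` by a loop-free comparison: the list must equal its sorted copy, its minimum must be 0 and its number of distinct values must be max+1, which together force start-at-0 and adjacent steps of 0 or 1.
import Mathlib
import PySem

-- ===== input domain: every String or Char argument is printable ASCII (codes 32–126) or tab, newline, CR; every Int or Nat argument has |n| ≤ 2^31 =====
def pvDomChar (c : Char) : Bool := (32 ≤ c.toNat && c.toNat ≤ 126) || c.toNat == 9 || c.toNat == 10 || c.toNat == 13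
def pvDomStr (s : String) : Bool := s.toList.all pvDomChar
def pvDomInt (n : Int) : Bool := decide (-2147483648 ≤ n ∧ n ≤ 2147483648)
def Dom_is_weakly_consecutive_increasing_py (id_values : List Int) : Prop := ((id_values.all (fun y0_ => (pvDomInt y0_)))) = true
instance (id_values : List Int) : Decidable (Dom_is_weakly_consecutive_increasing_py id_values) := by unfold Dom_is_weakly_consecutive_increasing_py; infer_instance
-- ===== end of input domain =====

-- B replaces A's running-`last` scan with a loop-free check: the list equals its sorted copy and its value-set equals {0..max}.


-- ===== PORT A =====
-- the for-loop of A: running `last`, early return False on a bad step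
def pvLoopA : Int → List Int → Bool
  | _, [] => true
  | last, v :: rest => if v < last || v > last + 1 then false else pvLoopA v rest

def is_weakly_consecutive_increasing_py (id_values : List Int) : Bool :=
  match id_values with
  | [] => false
  | x :: _ => if x ≠ 0 then false else pvLoopA 0 id_values

-- ===== PORT B =====
def is_weakly_consecutive_increasing_py_alt (id_values : List Int) : Bool :=
  match id_values with
  | [] => false
  | _ =>
    (id_values == PySem.List.sorted id_values (fun x => x) false) &&
    (match PySem.List.min? id_values (fun x => x) with
     | none => false  -- unreachable: the list is nonempty
     | some mn => mn == 0) &&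
    (match PySem.List.max? id_values (fun x => x) with
     | none => false  -- unreachable: the list is nonempty
     | some m => PySem.Set.len (PySem.Set.ofList id_values) == m + 1)

-- ===== PRECONDITION & SPEC =====
def Spec_is_weakly_consecutive_increasing_py (id_values : List Int) (out : Bool) : Prop := out = is_weakly_consecutive_increasing_py_alt id_values
instance (id_values : List Int) (out : Bool) : Decidable (Spec_is_weakly_consecutive_increasing_py id_values out) := by unfold Spec_is_weakly_consecutive_increasing_py; infer_instance

-- ===== CLAIM (what is proved, stated in full; the proofs are below) =====
def Claim_equal_is_weakly_consecutive_increasing_py : Prop := ∀ (id_values : List Int), Dom_is_weakly_consecutive_increasing_py id_values → Spec_is_weakly_consecutive_increasing_py id_values (is_weakly_consecutive_increasing_py id_values)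

-- ===== LEMMAS AND PROOFS =====

-- the common characterisation: head is 0 and each adjacent step is 0 or 1
def pvStep (a b : Int) : Prop := a ≤ b ∧ b ≤ a + 1

def pvGood (xs : List Int) : Prop :=
  xs.head? = some 0 ∧ List.IsChain pvStep xs

theorem pvLoopA_iff (last : Int) (xs : List Int) :
    pvLoopA last xs = true ↔ List.IsChain pvStep (last :: xs) := by
  induction xs generalizing last with
  | nil => simp [pvLoopA]
  | cons v rest ih =>
    rw [List.isChain_cons_cons]
    simp only [pvLoopA]
    by_cases h : v < last ∨ v > last + 1
    · rw [if_pos (by simpa [decide_eq_true_eq] using h)]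
      constructor
      · intro hf; cases hf
      · rintro ⟨⟨h1, h2⟩, _⟩; omega
    · rw [if_neg (by simpa [decide_eq_true_eq] using h)]
      rw [ih]
      exact ⟨fun hc => ⟨⟨by omega, by omega⟩, hc⟩, fun ⟨_, hc⟩ => hc⟩

theorem a_iff (xs : List Int) :
    is_weakly_consecutive_increasing_py xs = true ↔ pvGood xs := by
  cases xs with
  | nil => simp [is_weakly_consecutive_increasing_py, pvGood]
  | cons x rest =>
    simp only [is_weakly_consecutive_increasing_py, pvGood, List.head?_cons]
    by_cases hx : x = 0
    · subst hx
      rw [if_neg (by simp), pvLoopA_iff, List.isChain_cons_cons]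
      exact ⟨fun ⟨_, hc⟩ => ⟨rfl, hc⟩, fun ⟨_, hc⟩ => ⟨⟨le_refl 0, by omega⟩, hc⟩⟩
    · rw [if_pos (by simpa using hx)]
      constructor
      · intro h; simp at h
      · rintro ⟨h, _⟩; exact absurd (Option.some.inj h) hx

-- along a pvStep-chain every integer between the head and a member is a member
theorem pvChain_reach {a : Int} {xs : List Int}
    (hc : List.IsChain pvStep (a :: xs)) :
    ∀ k v, v ∈ xs → a ≤ k → k ≤ v → k ∈ a :: xs := by
  induction xs generalizing a with
  | nil => intro k v hv; cases hv
  | cons b t ih =>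
    rw [List.isChain_cons_cons] at hc
    obtain ⟨⟨hab, hba⟩, hct⟩ := hc
    intro k v hv hak hkv
    rcases eq_or_lt_of_le hak with heq | hlt
    · exact heq ▸ List.mem_cons_self
    · have hbk : b ≤ k := by
        rcases List.mem_cons.mp hv with heq | hvt
        · omega
        · omega
      rcases List.mem_cons.mp hv with heq | hvt
      · have hkb : k = b := by omega
        exact hkb ▸ List.mem_cons_of_mem _ List.mem_cons_self
      · exact List.mem_cons_of_mem _ (ih hct k v hvt hbk hkv)

-- a sorted list with no internal gaps is a pvStep-chain
theorem pvChain_of_dense :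
    ∀ (xs : List Int), xs.Pairwise (· ≤ ·) →
      (∀ p q, p ∈ xs → q ∈ xs → p < q → p + 1 ∈ xs) →
      List.IsChain pvStep xs := by
  intro xs
  induction xs with
  | nil => intro _ _; exact List.IsChain.nil
  | cons a l ih =>
    intro hp hd
    cases l with
    | nil => exact List.isChain_singleton a
    | cons b t =>
      have hab : a ≤ b := (List.pairwise_cons.mp hp).1 b List.mem_cons_self
      rw [List.isChain_cons_cons]
      refine ⟨⟨hab, ?_⟩, ih (List.pairwise_cons.mp hp).2 ?_⟩
      · -- b ≤ a + 1: otherwise a+1 would have to be in the list, but nothing fits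
        by_contra hgt
        have hmem : a + 1 ∈ a :: b :: t :=
          hd a b List.mem_cons_self (List.mem_cons_of_mem _ List.mem_cons_self) (by omega)
        rcases List.mem_cons.mp hmem with h1 | h1
        · omega
        rcases List.mem_cons.mp h1 with h2 | h2
        · omega
        · have := (List.pairwise_cons.mp (List.pairwise_cons.mp hp).2).1 _ h2
          omega
      · intro p q hpm hqm hpq
        have hap : a ≤ p := (List.pairwise_cons.mp hp).1 p hpm
        have hmem : p + 1 ∈ a :: b :: t :=
          hd p q (List.mem_cons_of_mem _ hpm) (List.mem_cons_of_mem _ hqm) hpq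
        rcases List.mem_cons.mp hmem with h1 | h1
        · -- p + 1 = a is impossible since a ≤ p... unless a = p + 1? a ≤ p < p+1 = a
          omega
        · exact h1

-- a Nodup list of m+1 integers all lying in [0, m] contains every integer of [0, m]
theorem pvSet_full {S : List Int} {m : Int} (hnd : S.Nodup)
    (hb : ∀ y ∈ S, 0 ≤ y ∧ y ≤ m) (hlen : (S.length : Int) = m + 1) :
    ∀ k, 0 ≤ k → k ≤ m → k ∈ S := by
  intro k hk0 hkm
  have hsub : S.toFinset ⊆ Finset.Icc 0 m := by
    intro y hy
    rw [List.mem_toFinset] at hy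
    rw [Finset.mem_Icc]
    exact hb y hy
  have hcard : (Finset.Icc (0 : Int) m).card ≤ S.toFinset.card := by
    rw [Int.card_Icc, List.toFinset_card_of_nodup hnd]
    omega
  have heq := Finset.eq_of_subset_of_card_le hsub hcard
  have hk : k ∈ S.toFinset := by
    rw [heq, Finset.mem_Icc]
    exact ⟨hk0, hkm⟩
  exact List.mem_toFinset.mp hk

-- conversely, a Nodup list whose members are exactly [0, m] has length m+1
theorem pvSet_len {S : List Int} {m : Int} (hnd : S.Nodup) (h0m : 0 ≤ m)
    (hmem : ∀ k, k ∈ S ↔ 0 ≤ k ∧ k ≤ m) : (S.length : Int) = m + 1 := by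
  have hfin : S.toFinset = Finset.Icc 0 m := by
    ext y
    rw [List.mem_toFinset, Finset.mem_Icc]
    exact hmem y
  have hcard := congrArg Finset.card hfin
  rw [List.toFinset_card_of_nodup hnd, Int.card_Icc] at hcard
  omega

theorem b_iff (xs : List Int) :
    is_weakly_consecutive_increasing_py_alt xs = true ↔ pvGood xs := by
  cases xs with
  | nil => simp [is_weakly_consecutive_increasing_py_alt, pvGood]
  | cons x rest =>
    simp only [is_weakly_consecutive_increasing_py_alt]
    rcases hmn : PySem.List.min? (x :: rest) (fun x => x) with _ | mn
    · exact absurd ((PySem.List.min?_eq_none_iff _ _).mp hmn) (by simp)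
    rcases hm : PySem.List.max? (x :: rest) (fun x => x) with _ | m
    · exact absurd ((PySem.List.max?_eq_none_iff _ _).mp hm) (by simp)
    have hmmem : m ∈ x :: rest := PySem.List.max?_mem hm
    have hmax : ∀ y ∈ x :: rest, y ≤ m := PySem.List.max?_isMax hm
    have hmnmem : mn ∈ x :: rest := PySem.List.min?_mem hmn
    have hmin : ∀ y ∈ x :: rest, mn ≤ y := PySem.List.min?_isMin hmn
    rw [Bool.and_eq_true, Bool.and_eq_true, beq_iff_eq, beq_iff_eq, beq_iff_eq]
    simp only [PySem.Set.len]
    constructor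
    · rintro ⟨⟨hsorted, hmn0⟩, hlen⟩
      have hpw : (x :: rest).Pairwise (· ≤ ·) := by
        rw [hsorted]
        exact PySem.List.sorted_pairwise (x :: rest) _
      have hge : ∀ y ∈ x :: rest, 0 ≤ y := fun y hy => hmn0 ▸ hmin y hy
      have hbounds : ∀ y ∈ PySem.Set.ofList (x :: rest), 0 ≤ y ∧ y ≤ m := by
        intro y hy
        rw [PySem.Set.mem_ofList] at hy
        exact ⟨hge y hy, hmax y hy⟩
      have hfull := pvSet_full (PySem.Set.nodup_ofList _) hbounds hlen
      have h0m : 0 ≤ m := hge m hmmem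
      have h0in : (0 : Int) ∈ x :: rest := by
        have h := hfull 0 le_rfl h0m
        rwa [PySem.Set.mem_ofList] at h
      have hx0 : x = 0 := by
        have hx0le := hge x List.mem_cons_self
        rcases List.mem_cons.mp h0in with h | h
        · omega
        · have := (List.pairwise_cons.mp hpw).1 0 h
          omega
      refine ⟨by simp [hx0], pvChain_of_dense _ hpw ?_⟩
      intro p q hpm hqm hpq
      have hp := hge p hpm
      have hqb := hmax q hqm
      have h := hfull (p + 1) (by omega) (by omega)
      rwa [PySem.Set.mem_ofList] at h
    · rintro ⟨hhead, hchain⟩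
      have hx0 : x = 0 := Option.some.inj (by simpa using hhead)
      subst hx0
      have hpw : (0 :: rest : List Int).Pairwise (· ≤ ·) :=
        List.isChain_iff_pairwise.mp (hchain.imp (fun _ _ h => h.1))
      have hge : ∀ y ∈ (0 :: rest : List Int), 0 ≤ y := by
        intro y hy
        rcases List.mem_cons.mp hy with heq | h
        · omega
        · exact (List.pairwise_cons.mp hpw).1 y h
      have h0m : 0 ≤ m := hge m hmmem
      refine ⟨⟨(PySem.List.sorted_eq_self_of_pairwise _ _ hpw).symm, ?_⟩, ?_⟩
      · have h1 := hmin 0 List.mem_cons_self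
        have h2 := hge mn hmnmem
        omega
      · have hmem : ∀ k, k ∈ PySem.Set.ofList ((0 : Int) :: rest) ↔ 0 ≤ k ∧ k ≤ m := by
          intro k
          rw [PySem.Set.mem_ofList]
          constructor
          · intro hk
            exact ⟨hge k hk, hmax k hk⟩
          · rintro ⟨hk0, hkm⟩
            rcases List.mem_cons.mp hmmem with heq | hmr
            · have hk : k = 0 := by omega
              simp [hk]
            · exact pvChain_reach hchain k m hmr hk0 (by omega)
        exact pvSet_len (PySem.Set.nodup_ofList _) h0m hmem

-- ===== VERDICT (by name: the statement is the Claim_ definition above) =====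
theorem is_weakly_consecutive_increasing_py_spec : Claim_equal_is_weakly_consecutive_increasing_py := by
  intro xs _
  unfold Spec_is_weakly_consecutive_increasing_py
  rw [Bool.eq_iff_iff, a_iff, b_iff]
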